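-- pv_equiv track=rewrite | github.com/FelipeKha/PythonWordSearch | index_management.py | _conversion_index_to_lower
-- ===== SOURCE A (Python) =====
-- def _conversion_index_to_lower(index_dict_upper):
--     index_dict_lower = {}
--     for key in index_dict_upper:
--         key_low = key.lower()
--         if key_low in index_dict_lower:
--             index_dict_lower[key_low] = index_dict_lower[key_low].union(set(index_dict_upper[key]))
--         else:
--             index_dict_lower[key_low] = set(index_dict_upper[key])
--     return index_dict_lower
-- ===== SOURCE B (Python) =====
-- def _conversion_index_to_lower(index_dict_upper):
--     # group-then-reduce: collect the value lists per lowercased key, then union each group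
--     groups = {}
--     for key, vals in index_dict_upper.items():
--         groups.setdefault(key.lower(), []).append(vals)
--     return {key_low: set().union(*group) for key_low, group in groups.items()}
-- ===== Notes on version B (the rewrite author's own statement) =====
-- stated objective: alternative
-- what changed: Replaces A's single incremental fold (if-key-seen-then-union-else-new-set) by a group-then-reduce decomposition: a first pass groups the value lists under each lowercased key, a second pass builds each result set as one union over the whole group.
import Mathlib
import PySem

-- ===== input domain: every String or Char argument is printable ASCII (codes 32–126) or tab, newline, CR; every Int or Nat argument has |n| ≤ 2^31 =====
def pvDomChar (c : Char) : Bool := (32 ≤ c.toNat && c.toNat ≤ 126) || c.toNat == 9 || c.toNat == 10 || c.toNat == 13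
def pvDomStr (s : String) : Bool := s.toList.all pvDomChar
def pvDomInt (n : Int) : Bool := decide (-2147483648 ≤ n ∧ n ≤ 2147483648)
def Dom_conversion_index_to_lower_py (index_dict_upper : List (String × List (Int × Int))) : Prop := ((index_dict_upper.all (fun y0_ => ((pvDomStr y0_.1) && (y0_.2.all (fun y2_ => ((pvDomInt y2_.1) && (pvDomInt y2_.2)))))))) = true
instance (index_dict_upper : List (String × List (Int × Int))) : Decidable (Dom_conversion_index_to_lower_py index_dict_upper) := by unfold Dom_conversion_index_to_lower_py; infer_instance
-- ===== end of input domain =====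

-- B replaces A's incremental if/else union fold by a group-then-reduce pass (group the value
-- lists per lowercased key, then union each group); same results, different decomposition.

-- ===== PORT A =====
-- 'for key in index_dict_upper' iterates the dict's entries in insertion order;
-- 'index_dict_upper[key]' is the dict lookup (never a KeyError here, so getD is exact).
def conversion_index_to_lower_py (index_dict_upper : List (String × List (Int × Int))) : List (String × List (Int × Int)) :=
  (index_dict_upper.foldl
    (fun index_dict_lower kv =>
      let key_low := PySem.Str.lower kv.1
      if index_dict_lower.contains key_low then
        index_dict_lower.insert key_low
          (PySem.Set.union (index_dict_lower.getD key_low [])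
            (PySem.Set.ofList ((PySem.Dict.mk index_dict_upper).getD kv.1 [])))
      else
        index_dict_lower.insert key_low
          (PySem.Set.ofList ((PySem.Dict.mk index_dict_upper).getD kv.1 [])))
    (PySem.Dict.empty : PySem.Dict String (List (Int × Int)))).items

-- ===== PORT B =====
-- first pass: groups[key.lower()] collects the value lists; second pass: set().union(*group)
-- starts from the empty set and unions the group's lists left to right.
def conversion_index_to_lower_py_alt (index_dict_upper : List (String × List (Int × Int))) : List (String × List (Int × Int)) :=
  ((index_dict_upper.foldl
      (fun g kv => g.modify (PySem.Str.lower kv.1) [] (fun gr => gr ++ [kv.2]))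
      (PySem.Dict.empty : PySem.Dict String (List (List (Int × Int))))).items).map
    (fun p => (p.1, p.2.foldl (fun s vals => PySem.Set.union s vals) PySem.Set.empty))

-- ===== PRECONDITION & SPEC =====
-- Pre_ excludes association lists with duplicate keys: A's parameter is a Python dict, whose
-- keys are necessarily distinct, so such lists do not represent any input A is ever called on.
def Pre_conversion_index_to_lower_py (index_dict_upper : List (String × List (Int × Int))) : Prop :=
  (index_dict_upper.map Prod.fst).Nodup
instance (index_dict_upper : List (String × List (Int × Int))) : Decidable (Pre_conversion_index_to_lower_py index_dict_upper) := by unfold Pre_conversion_index_to_lower_py; infer_instance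

def pvWitness_conversion_index_to_lower_py : (List (String × List (Int × Int))) :=
  [("Ab", [(1, 2)]), ("aB", [(2, 3), (1, 2)]), ("x", [])]

def Spec_conversion_index_to_lower_py (index_dict_upper : List (String × List (Int × Int))) (out : List (String × List (Int × Int))) : Prop := out = conversion_index_to_lower_py_alt index_dict_upper
instance (index_dict_upper : List (String × List (Int × Int))) (out : List (String × List (Int × Int))) : Decidable (Spec_conversion_index_to_lower_py index_dict_upper out) := by unfold Spec_conversion_index_to_lower_py; infer_instance

-- ===== CLAIM (what is proved, stated in full; the proofs are below) =====
def Claim_equal_conversion_index_to_lower_py : Prop := ∀ (index_dict_upper : List (String × List (Int × Int))), Dom_conversion_index_to_lower_py index_dict_upper → Pre_conversion_index_to_lower_py index_dict_upper → Spec_conversion_index_to_lower_py index_dict_upper (conversion_index_to_lower_py index_dict_upper)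

-- ===== LEMMAS AND PROOFS =====

-- the lowercased key of an entry
def pvLowKey (kv : String × List (Int × Int)) : String := PySem.Str.lower kv.1

-- A's loop body with the dict lookup already resolved to the entry's own value,
-- and the two branches merged into one insert (they insert at the same key).
def pvStepA (acc : PySem.Dict String (List (Int × Int))) (kv : String × List (Int × Int)) :
    PySem.Dict String (List (Int × Int)) :=
  acc.insert (pvLowKey kv)
    (if acc.contains (pvLowKey kv) then
      PySem.Set.union (acc.getD (pvLowKey kv) []) (PySem.Set.ofList kv.2)
    else PySem.Set.ofList kv.2)

-- updating a set with set(ys) is the same as updating it with ys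
theorem pv_update_ofList {α : Type} [BEq α] [LawfulBEq α] (s : PySem.Set α) (ys : List α) :
    s.update (PySem.Set.ofList ys) = s.update ys := by
  rw [PySem.Set.update_eq_append_filter, PySem.Set.update_eq_append_filter,
    PySem.Set.ofList_ofList]

-- under Nodup keys, A's fold over the list is a fold of pvStepA
theorem pv_foldA_eq (l : List (String × List (Int × Int)))
    (h : (l.map Prod.fst).Nodup) :
    l.foldl
      (fun acc kv =>
        if acc.contains (PySem.Str.lower kv.1) then
          acc.insert (PySem.Str.lower kv.1)
            (PySem.Set.union (acc.getD (PySem.Str.lower kv.1) [])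
              (PySem.Set.ofList ((PySem.Dict.mk l).getD kv.1 [])))
        else
          acc.insert (PySem.Str.lower kv.1)
            (PySem.Set.ofList ((PySem.Dict.mk l).getD kv.1 [])))
      PySem.Dict.empty
    = l.foldl pvStepA PySem.Dict.empty := by
  apply PySem.List.foldl_congr_mem
  intro acc kv hkv
  have hmem : (kv.1, kv.2) ∈ (PySem.Dict.mk l).items := by simpa using hkv
  have hnd : (PySem.Dict.mk l).keys.Nodup := by simpa [PySem.Dict.keys] using h
  have hval : (PySem.Dict.mk l).getD kv.1 [] = kv.2 :=
    PySem.Dict.getD_of_mem_items _ hmem hnd []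
  simp only [hval, pvStepA, pvLowKey]
  split <;> rfl

-- keys of A's fold: first occurrences of the lowercased keys, in order
theorem pv_keysA (l : List (String × List (Int × Int))) :
    (l.foldl pvStepA PySem.Dict.empty).keys = PySem.Set.ofList (l.map pvLowKey) := by
  have := PySem.Dict.keys_foldl_insert_key l pvLowKey
    (fun acc kv =>
      if acc.contains (pvLowKey kv) then
        PySem.Set.union (acc.getD (pvLowKey kv) []) (PySem.Set.ofList kv.2)
      else PySem.Set.ofList kv.2)
    PySem.Dict.empty
  simpa [pvStepA, PySem.Set.update_nil_left] using this

theorem pv_nodup_keysA (l : List (String × List (Int × Int))) :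
    (l.foldl pvStepA PySem.Dict.empty).keys.Nodup := by
  have := PySem.Dict.nodup_keys_foldl_insert_key l pvLowKey
    (fun acc kv =>
      if acc.contains (pvLowKey kv) then
        PySem.Set.union (acc.getD (pvLowKey kv) []) (PySem.Set.ofList kv.2)
      else PySem.Set.ofList kv.2)
    PySem.Dict.empty (by simp [PySem.Dict.keys, PySem.Dict.empty])
  simpa [pvStepA] using this

-- the value A accumulates at k: the set of all coordinates of the entries lowering to k
theorem pv_getDA (l : List (String × List (Int × Int))) (k : String) :
    (l.foldl pvStepA PySem.Dict.empty).getD k []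
      = PySem.Set.ofList (((l.filter (fun kv => pvLowKey kv == k)).map Prod.snd).flatten) := by
  induction l using List.reverseRecOn with
  | nil => rfl
  | append_singleton l x ih =>
    rw [List.foldl_append]
    simp only [List.foldl_cons, List.foldl_nil, pvStepA, PySem.Dict.getD_insert,
      List.filter_append, List.filter_cons, List.filter_nil]
    by_cases hk : k = pvLowKey x
    · subst hk
      simp only [beq_self_eq_true, if_true, List.map_append, List.map_cons, List.map_nil,
        List.flatten_append, List.flatten_cons, List.flatten_nil, List.append_nil]
      by_cases hc : (l.foldl pvStepA PySem.Dict.empty).contains (pvLowKey x) = true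
      · simp only [hc, if_true, ih, PySem.Set.union, pv_update_ofList,
          ← PySem.Set.ofList_append]
      · rw [if_neg hc]
        have hnil : l.filter (fun kv => pvLowKey kv == pvLowKey x) = [] := by
          rw [List.filter_eq_nil_iff]
          intro kv hkv hbeq
          apply hc
          rw [PySem.Dict.contains_iff_mem_keys, pv_keysA, PySem.Set.mem_ofList]
          refine List.mem_map.2 ⟨kv, hkv, by simpa using hbeq⟩
        simp [hnil]
    · have hbeq : (pvLowKey x == k) = false := by
        simp [beq_eq_false_iff_ne]; exact fun h => hk h.symm
      simp [hk, hbeq, ih]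

-- B's groups dict, at key k: the value lists of the entries lowering to k, in order
theorem pv_getDB (l : List (String × List (Int × Int))) (k : String) :
    (l.foldl (fun g kv => g.modify (PySem.Str.lower kv.1) [] (fun gr => gr ++ [kv.2]))
        (PySem.Dict.empty : PySem.Dict String (List (List (Int × Int))))).getD k []
      = (l.filter (fun kv => pvLowKey kv == k)).map Prod.snd := by
  have hfold :
      l.foldl (fun g kv => g.modify (PySem.Str.lower kv.1) [] (fun gr => gr ++ [kv.2]))
        (PySem.Dict.empty : PySem.Dict String (List (List (Int × Int))))
      = (l.map (fun kv => (pvLowKey kv, kv.2))).foldl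
          (fun g p => g.modify p.1 [] (fun gr => gr ++ [p.2])) PySem.Dict.empty := by
    rw [List.foldl_map]
    simp [pvLowKey]
  rw [hfold, PySem.Dict.getD_foldl_modify_append, List.filter_map]
  simp [Function.comp_def, pvLowKey]

theorem pv_keysB (l : List (String × List (Int × Int))) :
    (l.foldl (fun g kv => g.modify (PySem.Str.lower kv.1) [] (fun gr => gr ++ [kv.2]))
        (PySem.Dict.empty : PySem.Dict String (List (List (Int × Int))))).keys
      = PySem.Set.ofList (l.map pvLowKey) := by
  have := PySem.Dict.keys_foldl_modify_key l (fun kv => PySem.Str.lower kv.1) []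
    (fun _ kv gr => gr ++ [kv.2])
    (PySem.Dict.empty : PySem.Dict String (List (List (Int × Int))))
  simpa [PySem.Set.update_nil_left, pvLowKey] using this

theorem pv_nodup_keysB (l : List (String × List (Int × Int))) :
    (l.foldl (fun g kv => g.modify (PySem.Str.lower kv.1) [] (fun gr => gr ++ [kv.2]))
        (PySem.Dict.empty : PySem.Dict String (List (List (Int × Int))))).keys.Nodup := by
  have := PySem.Dict.nodup_keys_foldl_modify_key l (fun kv => PySem.Str.lower kv.1) []
    (fun _ kv gr => gr ++ [kv.2])
    (PySem.Dict.empty : PySem.Dict String (List (List (Int × Int))))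
    (by simp [PySem.Dict.keys, PySem.Dict.empty])
  simpa using this

-- set().union(g1, g2, …) is the set of the concatenation, in first-occurrence order
theorem pv_foldl_union (group : List (List (Int × Int))) :
    group.foldl (fun s vals => PySem.Set.union s vals) PySem.Set.empty
      = PySem.Set.ofList group.flatten := by
  induction group using List.reverseRecOn with
  | nil => rfl
  | append_singleton g vs ih =>
    rw [List.foldl_append]
    simp only [List.foldl_cons, List.foldl_nil]
    rw [ih]
    show (PySem.Set.ofList g.flatten).update vs = _
    rw [← PySem.Set.ofList_append]
    simp

-- ===== VERDICT (by name: the statement is the Claim_ definition above) =====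
theorem conversion_index_to_lower_py_spec : Claim_equal_conversion_index_to_lower_py := by
  intro l _ hpre
  unfold Spec_conversion_index_to_lower_py
  unfold conversion_index_to_lower_py conversion_index_to_lower_py_alt
  rw [pv_foldA_eq l hpre]
  rw [PySem.Dict.items_eq_map_keys _ (pv_nodup_keysA l) [],
    PySem.Dict.items_eq_map_keys _ (pv_nodup_keysB l) [],
    pv_keysA, pv_keysB, List.map_map]
  apply List.map_congr_left
  intro k _
  simp only [Function.comp, pv_getDA, pv_getDB, pv_foldl_union]
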